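-- pv_equiv track=rewrite | github.com/Rerro-r/practica_Maquintel_electronica2 | Odómetro/Plan B/Envío binario/Codigo Odometria/odometria 4.25.py | procesar_imu
-- ===== SOURCE A (Python) =====
-- def procesar_imu(imu_data): #funcion para procesar los datos del imu
--     acelerometro = [0, 0, 0, 0, 0, 0]
--     magnetometro = [0, 0, 0, 0, 0, 0]
--     giroscopio = [0, 0, 0, 0, 0, 0]
--     lista_IMU = imu_data.split('\n')
--     if len(lista_IMU) >= 3:
--         for i in lista_IMU:
--             if len(i) > 6:
--                 A = i.split(",")
--                 if len(A) >= 6: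
--                     if A[1] == "0":
--                         giroscopio = i.split(",")
--                     elif A[1] == "1":
--                         acelerometro = i.split(",")
--                     elif A[1] == "2":
--                         magnetometro = i.split(",")
--     ace = str(acelerometro[1]) + ";" + str(acelerometro[3]) + ";" + str(acelerometro[4]) + ";" + str(acelerometro[5])
--     giro = str(giroscopio[1]) + ";" + str(giroscopio[3]) + ";" + str(giroscopio[4]) + ";" + str(giroscopio[5])
--     mag = str(magnetometro[1]) + ";" + str(magnetometro[3]) + ";" + str(magnetometro[4]) + ";" + str(magnetometro[5])
--     return ace, giro, mag
-- ===== SOURCE B (Python) =====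
-- def procesar_imu(imu_data):
--     # Reverse scan: for each sensor key, take the FIRST valid matching line from the
--     # end (= last-wins of A's forward overwrite), formatting fields 1,3,4,5.
--     lineas = imu_data.split('\n')
--
--     def pick(key):
--         if len(lineas) >= 3:
--             for ln in reversed(lineas):
--                 f = ln.split(',')
--                 if len(ln) > 6 and len(f) >= 6 and f[1] == key:
--                     return f[1] + ';' + f[3] + ';' + f[4] + ';' + f[5]
--         return '0;0;0;0'
--
--     return pick('1'), pick('0'), pick('2')
-- ===== Notes on version B (the rewrite author's own statement) =====
-- stated objective: alternative
-- what changed: Replaces A's forward overwrite loop over one mutable triple of lists with three independent reverse scans that each return at the first matching line (last-wins by construction) and format it immediately.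
import Mathlib
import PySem

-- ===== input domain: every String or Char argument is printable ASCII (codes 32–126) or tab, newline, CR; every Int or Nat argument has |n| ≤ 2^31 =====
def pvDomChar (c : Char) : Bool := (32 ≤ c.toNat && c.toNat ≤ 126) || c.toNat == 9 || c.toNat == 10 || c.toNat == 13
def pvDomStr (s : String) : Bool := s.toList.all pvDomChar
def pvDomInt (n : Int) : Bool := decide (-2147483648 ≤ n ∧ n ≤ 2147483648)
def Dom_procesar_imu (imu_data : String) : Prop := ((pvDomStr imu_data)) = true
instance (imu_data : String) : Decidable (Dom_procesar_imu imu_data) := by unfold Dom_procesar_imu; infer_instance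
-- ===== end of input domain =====

-- B replaces A's forward overwrite loop over a mutable triple by three independent
-- reverse scans that stop at the first matching line (alternative decomposition, same cost).

-- ===== PORT A =====
-- s.split(sep) for a NONEMPTY literal sep: PySem.Str.split? is none only for sep = "".
def pvSplit (s sep : String) : List String := (PySem.Str.split? s sep).getD []

-- The initial Python lists are [0,0,0,0,0,0] (ints) and are only ever read through
-- str(·); str(0) = "0", so the uniform List String state with "0" entries is exact.
-- All reads acelerometro[i] etc. hit lists of length ≥ 6 (initial length 6, and a
-- reassignment requires len(A) ≥ 6), so getD with any default is exact here.
def pvFmtA (xs : List String) : String :=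
  xs.getD 1 "" ++ ";" ++ xs.getD 3 "" ++ ";" ++ xs.getD 4 "" ++ ";" ++ xs.getD 5 ""

-- state = (acelerometro, giroscopio, magnetometro), the Python return order
def pvStepA (st : List String × List String × List String) (i : String) :
    List String × List String × List String :=
  let (ace, giro, mag) := st
  if 6 < PySem.Str.len i then
    let A := pvSplit i ","
    if 6 ≤ A.length then
      if A.getD 1 "" = "0" then (ace, A, mag)
      else if A.getD 1 "" = "1" then (A, giro, mag)
      else if A.getD 1 "" = "2" then (ace, giro, A)
      else (ace, giro, mag)
    else (ace, giro, mag)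
  else (ace, giro, mag)

def procesar_imu (imu_data : String) : String × String × String :=
  let acelerometro : List String := ["0", "0", "0", "0", "0", "0"]
  let magnetometro : List String := ["0", "0", "0", "0", "0", "0"]
  let giroscopio : List String := ["0", "0", "0", "0", "0", "0"]
  let lista_IMU := pvSplit imu_data "\n"
  let st :=
    if 3 ≤ lista_IMU.length then
      lista_IMU.foldl pvStepA (acelerometro, giroscopio, magnetometro)
    else (acelerometro, giroscopio, magnetometro)
  (pvFmtA st.1, pvFmtA st.2.1, pvFmtA st.2.2)

-- ===== PORT B =====
def pvMatchB (key : String) (ln : String) : Bool :=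
  let f := pvSplit ln ","
  decide (6 < PySem.Str.len ln ∧ 6 ≤ f.length ∧ f.getD 1 "" = key)

def pvPickB (lineas : List String) (key : String) : String :=
  if 3 ≤ lineas.length then
    match lineas.reverse.find? (pvMatchB key) with
    | some ln =>
        let f := pvSplit ln ","
        f.getD 1 "" ++ ";" ++ f.getD 3 "" ++ ";" ++ f.getD 4 "" ++ ";" ++ f.getD 5 ""
    | none => "0;0;0;0"
  else "0;0;0;0"

def procesar_imu_alt (imu_data : String) : String × String × String :=
  let lineas := pvSplit imu_data "\n"
  (pvPickB lineas "1", pvPickB lineas "0", pvPickB lineas "2")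

-- ===== PRECONDITION & SPEC =====
def Spec_procesar_imu (imu_data : String) (out : String × String × String) : Prop := out = procesar_imu_alt imu_data
instance (imu_data : String) (out : String × String × String) : Decidable (Spec_procesar_imu imu_data out) := by unfold Spec_procesar_imu; infer_instance

-- ===== CLAIM (what is proved, stated in full; the proofs are below) =====
def Claim_equal_procesar_imu : Prop := ∀ (imu_data : String), Dom_procesar_imu imu_data → Spec_procesar_imu imu_data (procesar_imu imu_data)

-- ===== LEMMAS AND PROOFS =====

-- forward overwrite fold = first match of the reversed list
theorem foldl_if_eq_find_reverse {α β : Type} (f : β → Bool) (g : β → α) (init : α)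
    (xs : List β) :
    xs.foldl (fun s x => if f x then g x else s) init
      = match xs.reverse.find? f with | some x => g x | none => init := by
  induction xs generalizing init with
  | nil => rfl
  | cons x xs ih =>
    simp only [List.foldl_cons, List.reverse_cons, List.find?_append, ih]
    cases hf : xs.reverse.find? f with
    | some y => simp
    | none => by_cases h : f x <;> simp [h]

theorem pvStepA_fst (st : List String × List String × List String) (x : String) :
    (pvStepA st x).1 = if pvMatchB "1" x then pvSplit x "," else st.1 := by
  obtain ⟨a, g, m⟩ := st
  simp only [pvStepA, pvMatchB]
  split_ifs with h1 h2 h3 h4 h5 <;> simp_all <;> (exfalso; obtain ⟨hA, -⟩ := ‹_ ∧ _›; omega)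

theorem pvStepA_giro (st : List String × List String × List String) (x : String) :
    (pvStepA st x).2.1 = if pvMatchB "0" x then pvSplit x "," else st.2.1 := by
  obtain ⟨a, g, m⟩ := st
  simp only [pvStepA, pvMatchB]
  split_ifs with h1 h2 h3 h4 h5 <;> simp_all <;> (exfalso; obtain ⟨hA, -⟩ := ‹_ ∧ _›; omega)

theorem pvStepA_mag (st : List String × List String × List String) (x : String) :
    (pvStepA st x).2.2 = if pvMatchB "2" x then pvSplit x "," else st.2.2 := by
  obtain ⟨a, g, m⟩ := st
  simp only [pvStepA, pvMatchB]
  split_ifs with h1 h2 h3 h4 h5 <;> simp_all <;> (exfalso; obtain ⟨hA, -⟩ := ‹_ ∧ _›; omega)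

theorem fold_fst (xs : List String) (st : List String × List String × List String) :
    (xs.foldl pvStepA st).1
      = xs.foldl (fun s x => if pvMatchB "1" x then pvSplit x "," else s) st.1 := by
  induction xs generalizing st with
  | nil => rfl
  | cons x xs ih => simp only [List.foldl_cons, ih, pvStepA_fst]

theorem fold_giro (xs : List String) (st : List String × List String × List String) :
    (xs.foldl pvStepA st).2.1
      = xs.foldl (fun s x => if pvMatchB "0" x then pvSplit x "," else s) st.2.1 := by
  induction xs generalizing st with
  | nil => rfl
  | cons x xs ih => simp only [List.foldl_cons, ih, pvStepA_giro]

theorem fold_mag (xs : List String) (st : List String × List String × List String) :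
    (xs.foldl pvStepA st).2.2
      = xs.foldl (fun s x => if pvMatchB "2" x then pvSplit x "," else s) st.2.2 := by
  induction xs generalizing st with
  | nil => rfl
  | cons x xs ih => simp only [List.foldl_cons, ih, pvStepA_mag]

theorem pvFmt_default : pvFmtA ["0", "0", "0", "0", "0", "0"] = "0;0;0;0" := by decide

theorem fmt_component (xs : List String) (key : String) (h3 : 3 ≤ xs.length) :
    pvFmtA (xs.foldl (fun s x => if pvMatchB key x then pvSplit x "," else s)
      ["0", "0", "0", "0", "0", "0"]) = pvPickB xs key := by
  rw [foldl_if_eq_find_reverse]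
  unfold pvPickB
  rw [if_pos h3]
  cases xs.reverse.find? (pvMatchB key) with
  | some ln => rfl
  | none => exact pvFmt_default

-- ===== VERDICT (by name: the statement is the Claim_ definition above) =====
theorem procesar_imu_spec : Claim_equal_procesar_imu := by
  intro s _
  unfold Spec_procesar_imu procesar_imu procesar_imu_alt
  by_cases h3 : 3 ≤ (pvSplit s "\n").length
  · simp only [if_pos h3, fold_fst, fold_giro, fold_mag]
    exact congrArg₂ Prod.mk (fmt_component _ _ h3)
      (congrArg₂ Prod.mk (fmt_component _ _ h3) (fmt_component _ _ h3))
  · simp only [if_neg h3, pvFmt_default, pvPickB]
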